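-- pv_equiv track=rewrite | github.com/Jeffrey0117/monus | agent/loop.py | _convert_to_slides_md
-- ===== SOURCE A (Python) =====
-- def _convert_to_slides_md(report: str) -> str:
--     """將報告轉換為簡報格式 Markdown（用 --- 分隔）"""
--     lines = report.split('\n')
--     slides_parts = []
--     current_slide = []
--
--     for line in lines:
--         # 遇到 ## 標題就分割
--         if line.startswith('## '):
--             if current_slide:
--                 slides_parts.append('\n'.join(current_slide))
--             current_slide = [line]
--         else:
--             current_slide.append(line)
--
--     if current_slide:
--         slides_parts.append('\n'.join(current_slide))
--
--     # 用 --- 連接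
--     return '\n---\n'.join(slides_parts)
-- ===== SOURCE B (Python) =====
-- def _convert_to_slides_md(report: str) -> str:
--     """將報告轉換為簡報格式 Markdown（用 --- 分隔）"""
--     lines = report.split('\n')
--     idxs = [i for i, line in enumerate(lines) if line.startswith('## ')]
--     bounds = idxs if idxs and idxs[0] == 0 else [0] + idxs
--     ends = bounds[1:] + [len(lines)]
--     return '\n---\n'.join('\n'.join(lines[s:e]) for s, e in zip(bounds, ends))
-- ===== Notes on version B (the rewrite author's own statement) =====
-- stated objective: alternative
-- what changed: Replaces the single-pass accumulator-and-flush loop with index building: collect the positions of heading lines, turn them into segment boundaries, and build each slide by slicing the line list between consecutive boundaries.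
import Mathlib
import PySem

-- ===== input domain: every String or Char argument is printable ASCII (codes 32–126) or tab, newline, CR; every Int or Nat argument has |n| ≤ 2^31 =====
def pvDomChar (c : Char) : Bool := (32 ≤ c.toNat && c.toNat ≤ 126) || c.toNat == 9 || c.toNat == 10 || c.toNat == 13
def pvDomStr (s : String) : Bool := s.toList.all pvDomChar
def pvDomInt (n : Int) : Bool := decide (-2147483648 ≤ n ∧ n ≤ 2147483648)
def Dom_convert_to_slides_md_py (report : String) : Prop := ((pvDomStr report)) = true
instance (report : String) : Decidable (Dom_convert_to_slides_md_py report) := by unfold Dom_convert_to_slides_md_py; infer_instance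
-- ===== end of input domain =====

-- B replaces A's accumulator-and-flush loop by collecting heading indices and slicing the
-- line list between consecutive boundaries (alternative decomposition, same cost).

-- ===== PORT A =====
-- the fold over the lines, extracted as a helper (literal body of A's loop + final flush)
def pvBodyA (lines : List String) : String :=
  let st := lines.foldl
    (fun (st : List String × List String) line =>
      if PySem.Str.startswith line "## " then
        if st.2 ≠ [] then (st.1 ++ [PySem.Str.join "\n" st.2], [line])
        else (st.1, [line])
      else (st.1, st.2 ++ [line]))
    ([], [])
  PySem.Str.join "\n---\n"
    (if st.2 ≠ [] then st.1 ++ [PySem.Str.join "\n" st.2] else st.1)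

def convert_to_slides_md_py (report : String) : String :=
  -- report.split('\n'): sep is the non-empty literal "\n", so split? never returns none
  pvBodyA ((PySem.Str.split? report "\n").getD [])

-- ===== PORT B =====
-- literal body of Source B after the split: heading indices → boundaries → slices
def pvBodyB (lines : List String) : String :=
  let idxs := (PySem.List.enumerate lines).filterMap
      (fun p => if PySem.Str.startswith p.2 "## " then some p.1 else none)
  let bounds := if idxs ≠ [] ∧ idxs.headD 0 = 0 then idxs else 0 :: idxs
  let ends := bounds.drop 1 ++ [(lines.length : Int)]
  PySem.Str.join "\n---\n"
    ((bounds.zip ends).map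
      (fun p => PySem.Str.join "\n" (PySem.List.slice lines (some p.1) (some p.2))))

def convert_to_slides_md_py_alt (report : String) : String :=
  pvBodyB ((PySem.Str.split? report "\n").getD [])

-- ===== PRECONDITION & SPEC =====
def Spec_convert_to_slides_md_py (report : String) (out : String) : Prop := out = convert_to_slides_md_py_alt report
instance (report : String) (out : String) : Decidable (Spec_convert_to_slides_md_py report out) := by unfold Spec_convert_to_slides_md_py; infer_instance

-- ===== CLAIM (what is proved, stated in full; the proofs are below) =====
def Claim_equal_convert_to_slides_md_py : Prop := ∀ (report : String), Dom_convert_to_slides_md_py report → Spec_convert_to_slides_md_py report (convert_to_slides_md_py report)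

-- ===== LEMMAS AND PROOFS =====

-- is the line a '## ' heading?
def pvHead (s : String) : Bool := PySem.Str.startswith s "## "

-- reference decomposition: the groups of lines both programs turn into slides
def pvGroups : List String → List (List String)
  | [] => []
  | l :: rest =>
      (l :: rest.takeWhile (fun x => !pvHead x)) ::
        pvGroups (rest.dropWhile (fun x => !pvHead x))
termination_by ls => ls.length
decreasing_by
  simp only [List.length_cons]
  exact Nat.lt_succ_of_le (List.length_dropWhile_le _ rest)

def pvStepA (st : List String × List String) (line : String) : List String × List String :=
  if pvHead line then
    if st.2 ≠ [] then (st.1 ++ [PySem.Str.join "\n" st.2], [line])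
    else (st.1, [line])
  else (st.1, st.2 ++ [line])

def pvFin (st : List String × List String) : List String :=
  if st.2 ≠ [] then st.1 ++ [PySem.Str.join "\n" st.2] else st.1

lemma pvFoldA (rest : List String) : ∀ parts cur, cur ≠ [] →
    pvFin (rest.foldl pvStepA (parts, cur)) =
      parts ++ (((cur ++ rest.takeWhile (fun x => !pvHead x)) ::
        pvGroups (rest.dropWhile (fun x => !pvHead x))).map (PySem.Str.join "\n")) := by
  induction rest with
  | nil => intro parts cur hc; rw [pvGroups.eq_def]; simp [pvFin, hc]
  | cons x rest ih =>
    intro parts cur hc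
    by_cases hx : pvHead x
    · have hstep : pvStepA (parts, cur) x = (parts ++ [PySem.Str.join "\n" cur], [x]) := by
        simp [pvStepA, hx, hc]
      rw [List.foldl_cons, hstep, ih (parts ++ [PySem.Str.join "\n" cur]) [x] (by simp)]
      rw [show List.takeWhile (fun x => !pvHead x) (x :: rest) = [] by simp [hx]]
      rw [show List.dropWhile (fun x => !pvHead x) (x :: rest) = x :: rest by simp [hx]]
      conv_rhs => rw [pvGroups.eq_def]
      simp
    · have hstep : pvStepA (parts, cur) x = (parts, cur ++ [x]) := by
        simp [pvStepA, hx]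
      rw [List.foldl_cons, hstep, ih parts (cur ++ [x]) (by simp)]
      simp [hx]

lemma pvBodyA_eq (ls : List String) :
    pvBodyA ls = PySem.Str.join "\n---\n" ((pvGroups ls).map (PySem.Str.join "\n")) := by
  have hstep : (fun (st : List String × List String) line =>
      if PySem.Str.startswith line "## " then
        if st.2 ≠ [] then (st.1 ++ [PySem.Str.join "\n" st.2], [line])
        else (st.1, [line])
      else (st.1, st.2 ++ [line])) = pvStepA := by
    funext st line; simp [pvStepA, pvHead]
  have hbody : ∀ ms : List String,
      pvBodyA ms = PySem.Str.join "\n---\n" (pvFin (ms.foldl pvStepA ([], []))) := by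
    intro ms; rw [pvBodyA, hstep]; rfl
  cases ls with
  | nil => rw [hbody, pvGroups.eq_def]; rfl
  | cons l rest =>
    rw [hbody]
    have h1 : (l :: rest).foldl pvStepA ([], []) = rest.foldl pvStepA ([], [l]) := by
      rw [List.foldl_cons]
      by_cases hl : pvHead l
      · simp [pvStepA, hl]
      · simp [pvStepA, hl]
    rw [h1, pvFoldA rest [] [l] (by simp)]
    conv_rhs => rw [pvGroups.eq_def]
    simp

-- ---- B side ----

-- heading indices of ls, counting from s
def pvHIdx : List String → Nat → List Nat
  | [], _ => []
  | x :: xs, s => (if pvHead x then [s] else []) ++ pvHIdx xs (s + 1)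

def pvSegN (ls : List String) (p : Nat × Nat) : String :=
  PySem.Str.join "\n" ((ls.drop p.1).take (p.2 - p.1))

lemma pvHIdx_shift (xs : List String) : ∀ s t : Nat,
    pvHIdx xs (s + t) = (pvHIdx xs t).map (· + s) := by
  induction xs with
  | nil => intro s t; rfl
  | cons x xs ih =>
    intro s t
    simp only [pvHIdx, List.map_append]
    rw [show s + t + 1 = s + (t + 1) by omega, ih s (t + 1)]
    by_cases hx : pvHead x <;> simp [hx, Nat.add_comm]

lemma pvHIdx_ge (xs : List String) : ∀ s m, m ∈ pvHIdx xs s → s ≤ m := by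
  induction xs with
  | nil => intro s m h; simp [pvHIdx] at h
  | cons x xs ih =>
    intro s m h
    simp only [pvHIdx, List.mem_append] at h
    rcases h with h | h
    · by_cases hx : pvHead x
      · simp [hx] at h; omega
      · simp [hx] at h
    · have := ih (s + 1) m h; omega

lemma pvHIdx_nil (xs : List String) (hx : ∀ x ∈ xs, pvHead x = false) :
    ∀ s, pvHIdx xs s = [] := by
  induction xs with
  | nil => intro s; rfl
  | cons x xs ih =>
    intro s
    simp only [pvHIdx, hx x (by simp), if_false, List.nil_append, Bool.false_eq_true]
    exact ih (fun y hy => hx y (by simp [hy])) (s + 1)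

lemma pvHIdx_append (u v : List String) : ∀ s,
    pvHIdx (u ++ v) s = pvHIdx u s ++ pvHIdx v (s + u.length) := by
  induction u with
  | nil => intro s; simp [pvHIdx]
  | cons x xs ih =>
    intro s
    simp only [List.cons_append, pvHIdx, ih (s + 1), List.append_assoc, List.length_cons]
    rw [show s + (xs.length + 1) = s + 1 + xs.length by omega]

-- the port's filterMap over enumerate computes pvHIdx (as Int casts)
lemma pvIdxs_eq (ls : List String) : ∀ s : Nat,
    (PySem.List.enumerate ls (s : Int)).filterMap
        (fun p => if PySem.Str.startswith p.2 "## " then some p.1 else none) =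
      (pvHIdx ls s).map (fun (n : Nat) => (n : Int)) := by
  induction ls with
  | nil => intro s; simp [PySem.List.enumerate_nil, pvHIdx]
  | cons x xs ih =>
    intro s
    rw [PySem.List.enumerate_cons]
    have hcast : ((s : Int) + 1) = ((s + 1 : Nat) : Int) := by push_cast; ring
    rw [List.filterMap_cons, hcast, ih (s + 1)]
    by_cases hx : PySem.Chars.startswith x.toList ['#', '#', ' ']
    · simp [pvHIdx, pvHead, hx]
    · simp [pvHIdx, pvHead, hx]

lemma pvSegN_shift (u v : List String) (a b : Nat) :
    pvSegN (u ++ v) (a + u.length, b + u.length) = pvSegN v (a, b) := by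
  simp only [pvSegN]
  rw [show a + u.length = u.length + a by omega, List.drop_append,
    List.drop_eq_nil_of_le (by omega : u.length ≤ u.length + a), List.nil_append,
    show u.length + a - u.length = a by omega,
    show b + u.length - (u.length + a) = b - a by omega]

lemma pvDropHead {p : String → Bool} {l : List String} {x : String} {xs : List String}
    (h : l.dropWhile p = x :: xs) : p x = false := by
  induction l with
  | nil => simp at h
  | cons y ys ih =>
    rw [List.dropWhile_cons] at h
    by_cases hy : p y
    · exact ih (by simpa [hy] using h)
    · simp [hy] at h
      simp [h.1 ▸ hy]

lemma pvMainB (ls : List String) (h : ls ≠ []) :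
    (((0 :: pvHIdx ls.tail 1).zip (pvHIdx ls.tail 1 ++ [ls.length])).map (pvSegN ls)) =
      (pvGroups ls).map (PySem.Str.join "\n") := by
  induction ls using pvGroups.induct with
  | case1 => simp at h
  | case2 l rest ih =>
    have htw : ∀ x ∈ rest.takeWhile (fun x => !pvHead x), pvHead x = false := by
      intro x hx
      have := List.mem_takeWhile_imp hx
      simpa using this
    have hsplit := List.takeWhile_append_dropWhile (p := fun x => !pvHead x) (l := rest)
    set t := rest.takeWhile (fun x => !pvHead x) with ht
    set d := rest.dropWhile (fun x => !pvHead x) with hd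
    have hidx : pvHIdx rest 1 = pvHIdx d (t.length + 1) := by
      rw [← hsplit, pvHIdx_append, pvHIdx_nil t htw 1, List.nil_append,
        Nat.add_comm 1 t.length]
    cases hdd : d with
    | nil =>
      have hrt : rest = t := by rw [← hsplit, hdd]; simp
      rw [List.tail_cons, hidx, hdd]
      simp only [pvHIdx, List.nil_append, List.zip_cons_cons, List.zip_nil_right,
        List.map_cons, List.map_nil]
      conv_rhs => rw [pvGroups.eq_def]
      simp only [← ht, ← hd, hdd]
      rw [pvGroups.eq_def]
      simp only [List.map_cons, List.map_nil, pvSegN, List.drop_zero, Nat.sub_zero,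
        List.take_of_length_le (le_refl _)]
      rw [← hrt]
    | cons x xs =>
      have hxx : pvHead x = true := by
        have := pvDropHead (hd.symm.trans hdd)
        simpa using this
      have hu : l :: rest = (l :: t) ++ (x :: xs) := by rw [← hsplit, hdd]; rfl
      have hk : pvHIdx rest 1 = (t.length + 1) :: (pvHIdx xs 1).map (· + (t.length + 1)) := by
        rw [hidx, hdd]
        simp only [pvHIdx, hxx, if_pos, List.cons_append, List.nil_append]
        rw [pvHIdx_shift xs (t.length + 1) 1]
      have hlen : (l :: rest).length = (x :: xs).length + (t.length + 1) := by
        rw [hu]; simp; omega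
      rw [List.tail_cons, hk, hlen]
      have hzip : (((t.length + 1) :: (pvHIdx xs 1).map (· + (t.length + 1))).zip
          ((pvHIdx xs 1).map (· + (t.length + 1)) ++ [(x :: xs).length + (t.length + 1)])) =
          ((0 :: pvHIdx xs 1).zip (pvHIdx xs 1 ++ [(x :: xs).length])).map
            (Prod.map (· + (t.length + 1)) (· + (t.length + 1))) := by
        rw [← List.zip_map]
        simp [List.map_append]
      rw [List.cons_append, List.zip_cons_cons, List.map_cons, hzip, List.map_map]
      have hseg : (pvSegN (l :: rest) ∘ Prod.map (· + (t.length + 1)) (· + (t.length + 1))) =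
          pvSegN (x :: xs) := by
        funext p
        rcases p with ⟨a, b⟩
        show pvSegN (l :: rest) (a + (t.length + 1), b + (t.length + 1)) = pvSegN (x :: xs) (a, b)
        rw [hu]
        have := pvSegN_shift (l :: t) (x :: xs) a b
        simpa using this
      rw [hdd] at ih
      simp only [List.tail_cons] at ih
      rw [hseg, ih (by simp)]
      have hhead : pvSegN (l :: rest) (0, t.length + 1) = PySem.Str.join "\n" (l :: t) := by
        simp only [pvSegN, List.drop_zero, Nat.sub_zero]
        rw [hu, show t.length + 1 = (l :: t).length by simp, List.take_left]
      rw [hhead]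
      conv_rhs => rw [pvGroups.eq_def]
      simp [← ht, ← hd, hdd]

lemma pvBounds_eq (l : String) (rest : List String) :
    (if ((pvHIdx (l :: rest) 0).map (fun (n : Nat) => (n : Int))) ≠ [] ∧
        ((pvHIdx (l :: rest) 0).map (fun (n : Nat) => (n : Int))).headD 0 = 0
      then (pvHIdx (l :: rest) 0).map (fun (n : Nat) => (n : Int))
      else 0 :: (pvHIdx (l :: rest) 0).map (fun (n : Nat) => (n : Int))) =
      (0 :: pvHIdx rest 1).map (fun (n : Nat) => (n : Int)) := by
  by_cases hl : pvHead l
  · simp [pvHIdx, hl]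
  · cases hP : pvHIdx rest 1 with
    | nil => simp [pvHIdx, hl, hP]
    | cons m ms =>
      have hm : 1 ≤ m := pvHIdx_ge rest 1 m (by rw [hP]; simp)
      rw [if_neg]
      · simp [pvHIdx, hl, hP]
      · intro hcond
        have h2 := hcond.2
        simp [pvHIdx, hl, hP] at h2
        omega

lemma pvBodyB_eq (ls : List String) :
    pvBodyB ls = PySem.Str.join "\n---\n" ((pvGroups ls).map (PySem.Str.join "\n")) := by
  cases ls with
  | nil => rw [pvGroups.eq_def]; rfl
  | cons l rest =>
    have hidxs := pvIdxs_eq (l :: rest) 0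
    rw [Nat.cast_zero] at hidxs
    have hcomp : ((fun p : Int × Int => PySem.Str.join "\n"
        (PySem.List.slice (l :: rest) (some p.1) (some p.2))) ∘
        Prod.map (fun n : Nat => (n : Int)) (fun n : Nat => (n : Int))) = pvSegN (l :: rest) := by
      funext p
      rcases p with ⟨a, b⟩
      show PySem.Str.join "\n" (PySem.List.slice (l :: rest) (some (a : Int)) (some (b : Int))) = _
      rw [PySem.List.slice_natCast]
      rfl
    simp only [pvBodyB]
    rw [hidxs, pvBounds_eq]
    simp only [List.map_cons, List.drop_succ_cons, List.drop_zero]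
    rw [show ((0 : Nat) : Int) :: (pvHIdx rest 1).map (fun (n : Nat) => (n : Int)) =
        ((0 :: pvHIdx rest 1).map (fun (n : Nat) => (n : Int))) from (List.map_cons).symm]
    rw [show (pvHIdx rest 1).map (fun (n : Nat) => (n : Int)) ++ [((l :: rest).length : Int)] =
        (pvHIdx rest 1 ++ [(l :: rest).length]).map (fun (n : Nat) => (n : Int)) by simp]
    rw [List.zip_map, List.map_map, hcomp]
    have hm := pvMainB (l :: rest) (by simp)
    simp only [List.tail_cons] at hm
    rw [hm]

-- ===== VERDICT (by name: the statement is the Claim_ definition above) =====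
theorem convert_to_slides_md_py_spec : Claim_equal_convert_to_slides_md_py := by
  intro report _
  show convert_to_slides_md_py report = convert_to_slides_md_py_alt report
  rw [convert_to_slides_md_py, convert_to_slides_md_py_alt, pvBodyA_eq, pvBodyB_eq]
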